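-- pv_equiv track=rewrite | github.com/lsamec/myProjects | textClassification.py | mapTheRarity
-- ===== SOURCE A (Python) =====
-- def mapTheRarity(aDict):
--     rarityMap = {}
--     multiplier = len(aDict)
--     aDictInTupleSorted = sorted(aDict.items(), key=lambda kv: kv[1])
--     oldTuple = None
--     accumulation = 0
--     for tuple in aDictInTupleSorted:
--         if oldTuple is not None:
--             if oldTuple[1] == tuple[1]:
--                 multiplier += 1
--                 accumulation += 1
--             else:
--                 multiplier -= accumulation
--                 accumulation = 0
--         rarityMap[tuple[0]] = multiplier
--         oldTuple = tuple
--         multiplier -= 1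
--         if multiplier <= 0:
--             multiplier = 1
--
--     return rarityMap
-- ===== SOURCE B (Python) =====
-- def mapTheRarity(aDict):
--     n = len(aDict)
--     vals = list(aDict.values())
--     return {k: n - sum(1 for v in vals if v < x)
--             for k, x in sorted(aDict.items(), key=lambda kv: kv[1])}
-- ===== Notes on version B (the rewrite author's own statement) =====
-- stated objective: simpler
-- what changed: B drops A's running multiplier/accumulation/oldTuple state machine and assigns each key directly n minus the number of strictly smaller values, as a dict comprehension over the value-sorted items.
import Mathlib
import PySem

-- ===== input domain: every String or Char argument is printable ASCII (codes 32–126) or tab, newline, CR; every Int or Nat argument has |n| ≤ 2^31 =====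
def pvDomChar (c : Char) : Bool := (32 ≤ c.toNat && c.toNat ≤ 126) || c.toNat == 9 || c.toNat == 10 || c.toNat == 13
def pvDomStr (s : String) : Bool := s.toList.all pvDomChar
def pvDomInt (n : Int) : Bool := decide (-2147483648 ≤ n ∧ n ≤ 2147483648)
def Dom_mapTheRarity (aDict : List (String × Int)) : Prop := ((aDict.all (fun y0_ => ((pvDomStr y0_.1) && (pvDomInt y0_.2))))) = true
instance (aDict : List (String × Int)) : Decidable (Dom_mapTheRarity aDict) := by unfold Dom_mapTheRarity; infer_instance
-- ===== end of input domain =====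

-- B replaces A's sorted-scan multiplier/accumulation state machine by directly assigning
-- each key n minus the count of strictly smaller values (objective: simpler).


-- ===== PORT A =====
-- one iteration of A's for-loop: state = (rarityMap, multiplier, oldTuple, accumulation)
def pvStepA (st : PySem.Dict String Int × Int × Option (String × Int) × Int)
    (t : String × Int) : PySem.Dict String Int × Int × Option (String × Int) × Int :=
  let rarityMap := st.1
  let multiplier := st.2.1
  let oldTuple := st.2.2.1
  let accumulation := st.2.2.2
  let ma : Int × Int :=
    match oldTuple with
    | some o => if o.2 == t.2 then (multiplier + 1, accumulation + 1)
                else (multiplier - accumulation, 0)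
    | none => (multiplier, accumulation)
  let rarityMap := rarityMap.insert t.1 ma.1
  let multiplier := ma.1 - 1
  let multiplier := if multiplier ≤ 0 then 1 else multiplier
  (rarityMap, multiplier, some t, ma.2)

def mapTheRarity (aDict : List (String × Int)) : List (String × Int) :=
  let items := (PySem.Dict.ofList aDict).items
  let aDictInTupleSorted := PySem.List.sorted items (fun kv => kv.2) false
  (aDictInTupleSorted.foldl pvStepA
      (PySem.Dict.empty, (items.length : Int), none, 0)).1.items

-- ===== PORT B =====
def mapTheRarity_alt (aDict : List (String × Int)) : List (String × Int) :=
  let d := PySem.Dict.ofList aDict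
  let n : Int := d.size
  let vals := d.values
  ((PySem.List.sorted d.items (fun kv => kv.2) false).foldl
      (fun r kv => r.insert kv.1 (n - ((vals.filter (fun v => v < kv.2)).length : Int)))
      PySem.Dict.empty).items

-- ===== PRECONDITION & SPEC =====
def Spec_mapTheRarity (aDict : List (String × Int)) (out : List (String × Int)) : Prop := out = mapTheRarity_alt aDict
instance (aDict : List (String × Int)) (out : List (String × Int)) : Decidable (Spec_mapTheRarity aDict out) := by unfold Spec_mapTheRarity; infer_instance

-- ===== CLAIM (what is proved, stated in full; the proofs are below) =====
def Claim_equal_mapTheRarity : Prop := ∀ (aDict : List (String × Int)), Dom_mapTheRarity aDict → Spec_mapTheRarity aDict (mapTheRarity aDict)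

-- ===== LEMMAS AND PROOFS =====

-- every element of a ≤-sorted list is ≤ its last element
lemma pv_le_getLast {p : List (String × Int)} {o : String × Int}
    (hpw : p.Pairwise (fun a b => a.2 ≤ b.2)) (ho : p.getLast? = some o) :
    ∀ a ∈ p, a.2 ≤ o.2 := by
  obtain ⟨p', rfl⟩ := List.getLast?_eq_some_iff.mp ho
  rw [List.pairwise_append] at hpw
  intro a ha
  rcases List.mem_append.mp ha with h | h
  · exact hpw.2.2 a h o (by simp)
  · simp at h; simp [h]

-- one step of A's loop, previous tuple present, equal values
lemma pvStepA_some_eq (d : PySem.Dict String Int) (m a vo vt : Int) (ko kt : String)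
    (h : vo = vt) :
    pvStepA (d, m, some (ko, vo), a) (kt, vt)
      = (d.insert kt (m + 1), (if m ≤ 0 then 1 else m + 1 - 1), some (kt, vt), a + 1) := by
  simp [pvStepA, h]

-- one step of A's loop, previous tuple present, distinct values
lemma pvStepA_some_ne (d : PySem.Dict String Int) (m a vo vt : Int) (ko kt : String)
    (h : ¬ vo = vt) :
    pvStepA (d, m, some (ko, vo), a) (kt, vt)
      = (d.insert kt (m - a), (if m - a - 1 ≤ 0 then 1 else m - a - 1), some (kt, vt), 0) := by
  simp [pvStepA, h]

-- the first step of A's loop (no previous tuple)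
lemma pvStepA_none (d : PySem.Dict String Int) (m : Int) (kt : String) (vt : Int) :
    pvStepA (d, m, none, 0) (kt, vt)
      = (d.insert kt m, (if m - 1 ≤ 0 then 1 else m - 1), some (kt, vt), 0) := by
  simp [pvStepA]

-- counting split: below the maximum plus at the maximum is everything
lemma pv_countP_split (p : List (String × Int)) (vo : Int) (hpo : ∀ a ∈ p, a.2 ≤ vo) :
    p.countP (fun a => decide (a.2 < vo)) + p.countP (fun a => decide (a.2 = vo)) = p.length := by
  have h1 := List.length_eq_countP_add_countP (l := p) (p := fun a => decide (a.2 < vo))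
  have h2 : p.countP (fun a => decide ¬(decide (a.2 < vo) = true))
      = p.countP (fun a => decide (a.2 = vo)) :=
    List.countP_congr (by intro a ha; have := hpo a ha; simp; omega)
  omega

-- main loop invariant: A's fold over the remaining sorted suffix equals the direct-count fold
lemma pv_go (s : List (String × Int)) (hpw : s.Pairwise (fun a b => a.2 ≤ b.2)) :
    ∀ (r p : List (String × Int)) (o : String × Int) (d : PySem.Dict String Int),
    s = p ++ r → p.getLast? = some o →
    (r.foldl pvStepA (d,
        (s.length : Int) - (s.countP (fun a => decide (a.2 < o.2)) : Int) - 1, some o,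
        (p.countP (fun a => decide (a.2 = o.2)) : Int) - 1)).1
      = r.foldl (fun acc kv =>
          acc.insert kv.1 ((s.length : Int) - (s.countP (fun a => decide (a.2 < kv.2)) : Int))) d := by
  intro r
  induction r with
  | nil => intro p o d hs ho; simp
  | cons t r' ih =>
    rintro p ⟨ko, vo⟩ d hs ho
    obtain ⟨kt, vt⟩ := t
    -- order facts
    have hpw' : (p ++ (kt, vt) :: r').Pairwise (fun a b => a.2 ≤ b.2) := hs ▸ hpw
    rw [List.pairwise_append] at hpw'
    obtain ⟨hpp, hqq, hcross⟩ := hpw'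
    have homem : (ko, vo) ∈ p := by
      obtain ⟨p', rfl⟩ := List.getLast?_eq_some_iff.mp ho; simp
    have hpo : ∀ a ∈ p, a.2 ≤ vo := pv_le_getLast hpp ho
    have hot : vo ≤ vt := hcross (ko, vo) homem (kt, vt) (by simp)
    have htr : ∀ b ∈ r', vt ≤ b.2 := fun b hb => (List.pairwise_cons.mp hqq).1 b hb
    have hor : ∀ b ∈ r', vo ≤ b.2 := fun b hb => le_trans hot (htr b hb)
    -- counting facts (all in ℕ)
    have hlen : s.length = p.length + 1 + r'.length := by rw [hs]; simp; omega
    have hcLTo : s.countP (fun a => decide (a.2 < vo))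
        = p.countP (fun a => decide (a.2 < vo)) := by
      rw [hs, List.countP_append]
      have h0 : ((kt, vt) :: r').countP (fun a => decide (a.2 < vo)) = 0 :=
        List.countP_eq_zero.mpr (by
          rintro a ha
          rcases List.mem_cons.mp ha with rfl | ha'
          · simp; omega
          · have := hor a ha'; simp; omega)
      omega
    have hcLTt_le : r' ≠ [] → s.countP (fun a => decide (a.2 < vt)) + 2 ≤ s.length := by
      intro hne
      obtain ⟨t'', r'', rfl⟩ := List.exists_cons_of_ne_nil hne
      have h1 : p.countP (fun a => decide (a.2 < vt)) ≤ p.length := List.countP_le_length ..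
      have h2 : r''.countP (fun a => decide (a.2 < vt)) ≤ r''.length := List.countP_le_length ..
      have hvt'' : vt ≤ t''.2 := htr t'' (by simp)
      rw [hs, List.countP_append, List.countP_cons, List.countP_cons]
      simp only [List.length_append, List.length_cons]
      have hd1 : (decide (((kt, vt) : String × Int).2 < vt)) = false := by simp
      have hd2 : (decide (t''.2 < vt)) = false := by simp; omega
      rw [hd1, hd2]
      simp
      omega
    -- unfold one step of A's loop
    simp only [List.foldl_cons]
    by_cases ht : vo = vt
    · -- equal values: multiplier += 1, accumulation += 1
      subst ht
      rw [pvStepA_some_eq _ _ _ _ _ _ _ rfl]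
      rcases List.eq_nil_or_concat' r' with rfl | ⟨r'', t'', rfl⟩
      · -- last element: both folds stop right after this insert
        simp only [List.foldl_nil]
        congr 1
        rw [hcLTo] at *
        omega
      · have hbound := hcLTt_le (by simp)
        have hrlen : (r'' ++ [t''] : List (String × Int)).length = r''.length + 1 := by simp
        have hone : (p ++ [(kt, vo)]).countP (fun a => decide (a.2 = vo))
            = p.countP (fun a => decide (a.2 = vo)) + 1 := by
          simp [List.countP_append]
        have ih' : (List.foldl pvStepA
            (d.insert kt ((s.length : Int) - (s.countP (fun a => decide (a.2 < vo)) : Int)),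
             (s.length : Int) - (s.countP (fun a => decide (a.2 < vo)) : Int) - 1,
             some (kt, vo),
             ((p ++ [(kt, vo)]).countP (fun a => decide (a.2 = vo)) : Int) - 1)
            (r'' ++ [t''])).1
          = List.foldl (fun acc kv =>
              acc.insert kv.1 ((s.length : Int) - (s.countP (fun a => decide (a.2 < kv.2)) : Int)))
              (d.insert kt ((s.length : Int) - (s.countP (fun a => decide (a.2 < vo)) : Int)))
              (r'' ++ [t'']) :=
          ih (p ++ [(kt, vo)]) (kt, vo) _ (by rw [hs]; simp) (by simp)
        convert ih' using 3
        simp only [Prod.mk.injEq]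
        refine ⟨congrArg (d.insert kt) (by omega), ?_, trivial, ?_⟩
        · rw [if_neg (by omega)]
          omega
        · rw [hone]
          push_cast
          omega
    · -- new, strictly larger value: multiplier -= accumulation, accumulation = 0
      have hvo_lt : vo < vt := lt_of_le_of_ne hot ht
      have hcLTt : s.countP (fun a => decide (a.2 < vt)) = p.length := by
        rw [hs, List.countP_append]
        have h1 : p.countP (fun a => decide (a.2 < vt)) = p.length :=
          List.countP_eq_length.mpr (by intro a ha; have := hpo a ha; simp; omega)
        have h2 : ((kt, vt) :: r').countP (fun a => decide (a.2 < vt)) = 0 :=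
          List.countP_eq_zero.mpr (by
            rintro a ha
            rcases List.mem_cons.mp ha with rfl | ha'
            · simp
            · have := htr a ha'; simp; omega)
        omega
      have hsplit := pv_countP_split p vo hpo
      have hEQt : p.countP (fun a => decide (a.2 = vt)) = 0 :=
        List.countP_eq_zero.mpr (by intro a ha; have := hpo a ha; simp; omega)
      rw [pvStepA_some_ne _ _ _ _ _ _ _ ht]
      rcases List.eq_nil_or_concat' r' with rfl | ⟨r'', t'', rfl⟩
      · simp only [List.foldl_nil]
        congr 1
        rw [hcLTo, hcLTt] at *
        omega
      · have hbound := hcLTt_le (by simp)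
        have hrlen : (r'' ++ [t''] : List (String × Int)).length = r''.length + 1 := by simp
        have hone : (p ++ [(kt, vt)]).countP (fun a => decide (a.2 = vt))
            = p.countP (fun a => decide (a.2 = vt)) + 1 := by
          simp [List.countP_append]
        have ih' : (List.foldl pvStepA
            (d.insert kt ((s.length : Int) - (s.countP (fun a => decide (a.2 < vt)) : Int)),
             (s.length : Int) - (s.countP (fun a => decide (a.2 < vt)) : Int) - 1,
             some (kt, vt),
             ((p ++ [(kt, vt)]).countP (fun a => decide (a.2 = vt)) : Int) - 1)
            (r'' ++ [t''])).1
          = List.foldl (fun acc kv =>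
              acc.insert kv.1 ((s.length : Int) - (s.countP (fun a => decide (a.2 < kv.2)) : Int)))
              (d.insert kt ((s.length : Int) - (s.countP (fun a => decide (a.2 < vt)) : Int)))
              (r'' ++ [t'']) :=
          ih (p ++ [(kt, vt)]) (kt, vt) _ (by rw [hs]; simp) (by simp)
        convert ih' using 3
        simp only [Prod.mk.injEq]
        refine ⟨congrArg (d.insert kt) (by omega), ?_, trivial, ?_⟩
        · rw [if_neg (by omega)]
          omega
        · rw [hone, hEQt]
          simp

-- whole-loop form of pv_go, starting from the empty state
lemma pv_main (s : List (String × Int)) (hpw : s.Pairwise (fun a b => a.2 ≤ b.2)) :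
    (s.foldl pvStepA (PySem.Dict.empty, (s.length : Int), none, 0)).1
      = s.foldl (fun acc kv =>
          acc.insert kv.1 ((s.length : Int) - (s.countP (fun a => decide (a.2 < kv.2)) : Int)))
        PySem.Dict.empty := by
  rcases hs : s with _ | ⟨⟨kt, vt⟩, r'⟩
  · simp
  · rw [hs] at hpw
    have hmin : ∀ b ∈ r', vt ≤ b.2 := fun b hb => (List.pairwise_cons.mp hpw).1 b hb
    have hcLT0 : ((kt, vt) :: r').countP (fun a => decide (a.2 < vt)) = 0 :=
      List.countP_eq_zero.mpr (by
        rintro a ha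
        rcases List.mem_cons.mp ha with rfl | ha'
        · simp
        · have := hmin a ha'; simp; omega)
    simp only [List.foldl_cons]
    rw [pvStepA_none]
    rcases List.eq_nil_or_concat' r' with rfl | ⟨r'', t'', rfl⟩
    · simp only [List.foldl_nil]
      congr 1
      rw [hcLT0] at *
      omega
    · have hl : ((kt, vt) :: (r'' ++ [t''])).length = r''.length + 2 := by simp
      have ih' : (List.foldl pvStepA
          (PySem.Dict.empty.insert kt ((((kt, vt) :: (r'' ++ [t''])).length : Int)
              - (((kt, vt) :: (r'' ++ [t''])).countP (fun a => decide (a.2 < vt)) : Int)),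
           (((kt, vt) :: (r'' ++ [t''])).length : Int)
              - (((kt, vt) :: (r'' ++ [t''])).countP (fun a => decide (a.2 < vt)) : Int) - 1,
           some (kt, vt),
           ([((kt, vt))].countP (fun a => decide (a.2 = vt)) : Int) - 1)
          (r'' ++ [t''])).1
        = List.foldl (fun acc kv =>
            acc.insert kv.1 ((((kt, vt) :: (r'' ++ [t''])).length : Int)
              - (((kt, vt) :: (r'' ++ [t''])).countP (fun a => decide (a.2 < kv.2)) : Int)))
            (PySem.Dict.empty.insert kt ((((kt, vt) :: (r'' ++ [t''])).length : Int)
              - (((kt, vt) :: (r'' ++ [t''])).countP (fun a => decide (a.2 < vt)) : Int)))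
            (r'' ++ [t'']) :=
        pv_go _ hpw (r'' ++ [t'']) [(kt, vt)] (kt, vt) _ rfl (by simp)
      convert ih' using 3
      simp only [Prod.mk.injEq]
      refine ⟨congrArg (PySem.Dict.empty.insert kt) (by omega), ?_, trivial, by simp⟩
      rw [if_neg (by omega)]
      omega

-- ===== VERDICT (by name: the statement is the Claim_ definition above) =====
theorem mapTheRarity_spec : Claim_equal_mapTheRarity := by
  unfold Claim_equal_mapTheRarity
  intro aDict _
  unfold Spec_mapTheRarity mapTheRarity mapTheRarity_alt
  simp only []
  set items := (PySem.Dict.ofList aDict).items with hitems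
  set s := PySem.List.sorted items (fun kv => kv.2) false with hsdef
  have hperm : s.Perm items := PySem.List.sorted_perm ..
  have hlen : items.length = s.length := (hperm.length_eq).symm
  have hpw : s.Pairwise (fun a b => a.2 ≤ b.2) := PySem.List.sorted_pairwise ..
  have hsize : (PySem.Dict.ofList aDict).size = items.length := rfl
  have hfun : (fun (r : PySem.Dict String Int) (kv : String × Int) =>
        r.insert kv.1 (((PySem.Dict.ofList aDict).size : Int)
          - (((PySem.Dict.ofList aDict).values.filter (fun v => v < kv.2)).length : Int)))
      = (fun (acc : PySem.Dict String Int) (kv : String × Int) =>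
        acc.insert kv.1 ((s.length : Int) - (s.countP (fun a => decide (a.2 < kv.2)) : Int))) := by
    funext r kv
    have h1 : ((PySem.Dict.ofList aDict).values.filter (fun v => v < kv.2)).length
        = s.countP (fun a => decide (a.2 < kv.2)) := by
      rw [← List.countP_eq_length_filter]
      have hv : (PySem.Dict.ofList aDict).values = items.map (fun a => a.2) := rfl
      rw [hv, List.countP_map]
      exact (hperm.countP_eq _).symm
    rw [hsize, hlen, h1]
  rw [hfun]
  rw [hlen]
  exact congrArg PySem.Dict.items (pv_main s hpw)
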